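-- pv_equiv track=rewrite | github.com/aniketkumargaikwad/job-tracker | app/enrichment.py | _is_known_company
-- ===== SOURCE A (Python) =====
-- def _is_known_company(company: str, known_set: set[str]) -> bool:
--     """Substring-based company matching — handles 'HCL Technologies Limited',
--     'Deloitte USI', 'Capgemini Engineering', etc."""
--     c = company.lower().strip()
--     # Exact match first
--     if c in known_set:
--         return True
--     # Check if any known name is a substring of the company
--     for known in known_set:
--         if known in c:
--             return True
--     # Check if company is a substring of any known name
--     for known in known_set:
--         if c in known and len(c) >= 3:
--             return True
--     return False
-- ===== SOURCE B (Python) =====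
-- def _is_known_company(company: str, known_set: set[str]) -> bool:
--     """Hash-index approach: enumerate the substrings of the normalized company
--     whose lengths occur among the known names into a set once, so every
--     'known in c' test becomes an O(1) lookup (this subsumes the exact match);
--     a fixed-width sliding window over each known name handles 'c in known'."""
--     c = company.lower().strip()
--     n = len(c)
--     lens = {len(k) for k in known_set}
--     subs = {c[i:i + L] for L in lens for i in range(n + 1 - L)}
--     if any(k in subs for k in known_set):
--         return True
--     if n >= 3:
--         for k in known_set:
--             for i in range(len(k) - n + 1):
--                 if k[i:i + n] == c:
--                     return True
--     return False
-- ===== Notes on version B (the rewrite author's own statement) =====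
-- stated objective: alternative
-- what changed: Replaces per-known substring scans with a hash index: the substrings of the normalized company whose lengths occur among the known names are enumerated once into a set, so every 'known in c' test becomes a set lookup (subsuming A's separate exact-match stage), and 'c in known' is decided by a fixed-width sliding window over each known name instead of the builtin substring search.
import Mathlib
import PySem

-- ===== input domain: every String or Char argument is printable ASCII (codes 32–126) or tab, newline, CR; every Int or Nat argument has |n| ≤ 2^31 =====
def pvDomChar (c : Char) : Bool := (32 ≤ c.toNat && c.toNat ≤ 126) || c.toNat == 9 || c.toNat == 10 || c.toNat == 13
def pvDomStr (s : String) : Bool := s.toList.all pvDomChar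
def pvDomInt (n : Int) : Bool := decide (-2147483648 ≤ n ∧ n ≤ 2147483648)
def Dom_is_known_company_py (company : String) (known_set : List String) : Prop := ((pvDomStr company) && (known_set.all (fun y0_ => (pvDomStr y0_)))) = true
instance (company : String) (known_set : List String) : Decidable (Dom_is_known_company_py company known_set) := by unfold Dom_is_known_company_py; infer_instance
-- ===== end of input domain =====

-- B indexes all substrings of the normalized company in a set once (so 'known in c' becomes a set
-- lookup, subsuming A's exact-match stage) and uses a fixed-width sliding window for 'c in known';
-- an alternative algorithm, not claimed faster.
-- ===== PORT A =====
def is_known_company_py (company : String) (known_set : List String) : Bool :=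
  let c := PySem.Str.strip (PySem.Str.lower company)
  if known_set.contains c then true
  else if known_set.any (fun known => PySem.Str.isIn known c) then true
  else if known_set.any (fun known => PySem.Str.isIn c known && decide (3 ≤ PySem.Str.len c)) then true
  else false

-- ===== PORT B =====
-- subs = {c[i:i+L] for L in lens for i in range(n + 1 - L)}
def pvSubsOf (cl : List Char) (lens : PySem.Set Nat) : PySem.Set (List Char) :=
  PySem.Set.ofList (lens.flatMap (fun (L : Nat) =>
    (List.range (cl.length + 1 - L)).map (fun (i : Nat) =>
      PySem.List.slice cl (some (i : Int)) (some ((i : Int) + (L : Int))))))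

def is_known_company_py_alt (company : String) (known_set : List String) : Bool :=
  let cl := PySem.Chars.strip (PySem.Chars.lower company.toList)
  let n := cl.length
  let lens := PySem.Set.ofList (known_set.map (fun k => k.toList.length))
  let subs := pvSubsOf cl lens
  if known_set.any (fun k => decide (k.toList ∈ subs)) then true
  else if decide (3 ≤ n) &&
          known_set.any (fun k =>
            (List.range (k.toList.length + 1 - n)).any (fun i =>
              PySem.List.slice k.toList (some (i : Int)) (some ((i : Int) + (n : Int))) == cl))
    then true
  else false

-- ===== PRECONDITION & SPEC =====
def Spec_is_known_company_py (company : String) (known_set : List String) (out : Bool) : Prop := out = is_known_company_py_alt company known_set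
instance (company : String) (known_set : List String) (out : Bool) : Decidable (Spec_is_known_company_py company known_set out) := by unfold Spec_is_known_company_py; infer_instance

-- ===== CLAIM =====
def Claim_equal_is_known_company_py : Prop := ∀ (company : String) (known_set : List String), Dom_is_known_company_py company known_set → Spec_is_known_company_py company known_set (is_known_company_py company known_set)

-- ===== LEMMAS AND PROOFS =====

-- membership in B's length-restricted substring index is exactly the infix relation,
-- for strings whose length is one of the indexed lengths
lemma mem_pvSubsOf (cl : List Char) (lens : PySem.Set Nat) (s : List Char)
    (hs : s.length ∈ (lens : List Nat)) : s ∈ pvSubsOf cl lens ↔ s <:+: cl := by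
  unfold pvSubsOf
  rw [PySem.Set.mem_ofList, List.mem_flatMap]
  constructor
  · rintro ⟨L, hL, hm⟩
    obtain ⟨i, hi, rfl⟩ := List.mem_map.mp hm
    rw [PySem.List.slice_natCast_add]
    exact ((cl.drop i).take_prefix L).isInfix.trans (cl.drop_suffix i).isInfix
  · rintro ⟨pre, suf, hps⟩
    have hlen := congrArg List.length hps
    simp at hlen
    refine ⟨s.length, hs, ?_⟩
    simp only [List.mem_map, List.mem_range]
    refine ⟨pre.length, by omega, ?_⟩
    rw [PySem.List.slice_natCast_add, ← hps]
    simp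

-- B's sliding window of width s.length over k finds s iff s is an infix of k
lemma window_iff_infix (s k : List Char) :
    ((List.range (k.length + 1 - s.length)).any (fun i =>
      PySem.List.slice k (some (i : Int)) (some ((i : Int) + (s.length : Int))) == s)) = true
    ↔ s <:+: k := by
  simp only [List.any_eq_true, List.mem_range, beq_iff_eq]
  constructor
  · rintro ⟨i, hi, hsl⟩
    rw [PySem.List.slice_natCast_add] at hsl
    rw [← hsl]
    exact ((k.drop i).take_prefix _).isInfix.trans (k.drop_suffix i).isInfix
  · rintro ⟨pre, suf, hps⟩
    have hlen := congrArg List.length hps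
    simp at hlen
    refine ⟨pre.length, by omega, ?_⟩
    rw [PySem.List.slice_natCast_add, ← hps]
    simp

-- both ports decide the same proposition
lemma portA_true_iff (company : String) (known_set : List String) :
    is_known_company_py company known_set = true ↔
    ∃ k ∈ known_set,
      k.toList <:+: PySem.Chars.strip (PySem.Chars.lower company.toList) ∨
      (3 ≤ (PySem.Chars.strip (PySem.Chars.lower company.toList)).length ∧
        PySem.Chars.strip (PySem.Chars.lower company.toList) <:+: k.toList) := by
  unfold is_known_company_py
  set cs := PySem.Str.strip (PySem.Str.lower company) with hcs
  have hc : cs.toList = PySem.Chars.strip (PySem.Chars.lower company.toList) := by simp [hcs]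
  rw [← hc]
  dsimp only
  constructor
  · intro h
    split_ifs at h with h1 h2 h3
    · refine ⟨cs, List.mem_of_elem_eq_true h1, Or.inl (List.infix_refl _)⟩
    · obtain ⟨k, hk, hik⟩ := List.any_eq_true.mp h2
      exact ⟨k, hk, Or.inl ((PySem.Str.isIn_iff_infix _ _).mp hik)⟩
    · obtain ⟨k, hk, hik⟩ := List.any_eq_true.mp h3
      obtain ⟨hik, hlen⟩ := Bool.and_eq_true_iff.mp hik
      refine ⟨k, hk, Or.inr ⟨?_, (PySem.Str.isIn_iff_infix _ _).mp hik⟩⟩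
      have h3' := of_decide_eq_true hlen
      rw [PySem.Str.len_eq] at h3'
      exact_mod_cast h3'
  · rintro ⟨k, hk, hor⟩
    split_ifs with h1 h2 h3
    · rfl
    · rfl
    · rfl
    · exfalso
      rcases hor with hik | ⟨hlen, hik⟩
      · exact h2 (List.any_eq_true.mpr ⟨k, hk, (PySem.Str.isIn_iff_infix _ _).mpr hik⟩)
      · refine h3 (List.any_eq_true.mpr ⟨k, hk, ?_⟩)
        refine Bool.and_eq_true_iff.mpr ⟨(PySem.Str.isIn_iff_infix _ _).mpr hik, ?_⟩
        refine decide_eq_true ?_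
        rw [PySem.Str.len_eq]
        exact_mod_cast hlen

lemma portB_true_iff (company : String) (known_set : List String) :
    is_known_company_py_alt company known_set = true ↔
    ∃ k ∈ known_set,
      k.toList <:+: PySem.Chars.strip (PySem.Chars.lower company.toList) ∨
      (3 ≤ (PySem.Chars.strip (PySem.Chars.lower company.toList)).length ∧
        PySem.Chars.strip (PySem.Chars.lower company.toList) <:+: k.toList) := by
  unfold is_known_company_py_alt
  set cl := PySem.Chars.strip (PySem.Chars.lower company.toList) with hcl
  dsimp only
  constructor
  · intro h
    split_ifs at h with h1 h2
    · obtain ⟨k, hk, hm⟩ := List.any_eq_true.mp h1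
      have hsk : k.toList.length ∈ (PySem.Set.ofList (known_set.map (fun k => k.toList.length)) : List Nat) :=
        (PySem.Set.mem_ofList _ _).mpr (List.mem_map.mpr ⟨k, hk, rfl⟩)
      exact ⟨k, hk, Or.inl ((mem_pvSubsOf cl _ k.toList hsk).mp (of_decide_eq_true hm))⟩
    · obtain ⟨hn, h2'⟩ := Bool.and_eq_true_iff.mp h2
      obtain ⟨k, hk, hw⟩ := List.any_eq_true.mp h2'
      exact ⟨k, hk, Or.inr ⟨of_decide_eq_true hn, (window_iff_infix cl k.toList).mp hw⟩⟩
  · rintro ⟨k, hk, hor⟩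
    split_ifs with h1 h2
    · rfl
    · rfl
    · exfalso
      rcases hor with hik | ⟨hlen, hik⟩
      · have hsk : k.toList.length ∈ (PySem.Set.ofList (known_set.map (fun k => k.toList.length)) : List Nat) :=
          (PySem.Set.mem_ofList _ _).mpr (List.mem_map.mpr ⟨k, hk, rfl⟩)
        exact h1 (List.any_eq_true.mpr ⟨k, hk, decide_eq_true ((mem_pvSubsOf cl _ k.toList hsk).mpr hik)⟩)
      · refine absurd ?_ h2
        refine Bool.and_eq_true_iff.mpr ⟨decide_eq_true hlen, ?_⟩
        exact List.any_eq_true.mpr ⟨k, hk, (window_iff_infix cl k.toList).mpr hik⟩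

-- ===== VERDICT =====
theorem is_known_company_py_spec : Claim_equal_is_known_company_py := by
  intro company known_set _
  unfold Spec_is_known_company_py
  exact Bool.eq_iff_iff.mpr ((portA_true_iff company known_set).trans (portB_true_iff company known_set).symm)
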